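-- pv_equiv track=rewrite | github.com/ravikrsngh/Kalakritis | utils.py | reformatCart
-- ===== SOURCE A (Python) =====
-- def reformatCart(data):
--     id_list = []
--     arrays = []
--     arr = []
--     c = 0
--     for item in data:
--         arr.append(data[item])
--         if len(arr) == 2:
--             arrays.append(arr)
--             id_list.append(arr[0])
--             arr = []
--     return id_list, arrays
-- ===== SOURCE B (Python) =====
-- def reformatCart(data):
--     vals = list(data.values())
--     pairs = list(zip(vals[0::2], vals[1::2]))
--     return [a for a, _ in pairs], [[a, b] for a, b in pairs]
-- ===== Notes on version B (the rewrite author's own statement) =====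
-- stated objective: simpler
-- what changed: Replaced A's single incremental pass with a two-element buffer, per-key dict lookup and flag state by two strided slices of the values zipped together, from which both results are projected.
import Mathlib
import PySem

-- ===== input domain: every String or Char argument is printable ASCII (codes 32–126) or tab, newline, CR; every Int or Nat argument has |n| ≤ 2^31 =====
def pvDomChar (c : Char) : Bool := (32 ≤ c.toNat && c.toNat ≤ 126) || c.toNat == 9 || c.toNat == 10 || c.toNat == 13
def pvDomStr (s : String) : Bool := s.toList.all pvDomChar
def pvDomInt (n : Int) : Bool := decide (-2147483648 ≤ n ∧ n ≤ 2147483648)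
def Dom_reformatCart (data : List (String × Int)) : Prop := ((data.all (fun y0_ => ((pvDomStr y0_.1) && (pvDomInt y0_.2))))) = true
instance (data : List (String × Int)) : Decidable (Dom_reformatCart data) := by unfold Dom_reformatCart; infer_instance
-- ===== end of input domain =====

-- B pairs the values by zipping two strided projections instead of A's incremental buffer pass; same cost, simpler shape.

-- ===== PORT A =====
def reformatCart (data : List (String × Int)) : List Int × List (List Int) :=
  -- id_list, arrays, arr accumulated left to right; data[item] is a dict lookup (first match)
  let st := data.foldl
    (fun (s : List Int × List (List Int) × List Int) item =>
      let arr := s.2.2 ++ [((PySem.Dict.mk data).get? item.1).getD 0]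
      if arr.length = 2 then
        (s.1 ++ [(PySem.List.pyGet? arr 0).getD 0], s.2.1 ++ [arr], ([] : List Int))
      else (s.1, s.2.1, arr))
    ([], [], [])
  (st.1, st.2.1)

-- ===== PORT B =====
-- vals[0::2]: PySem has no step slices, so the stride-2 slice is ported by hand; exact:
-- it takes every second element starting at index 0.
def stride2 : List Int → List Int
  | [] => []
  | [x] => [x]
  | x :: _ :: rest => x :: stride2 rest

def reformatCart_alt (data : List (String × Int)) : List Int × List (List Int) :=
  let vals := data.map Prod.snd
  let pairs := (stride2 vals).zip (stride2 vals.tail)   -- zip(vals[0::2], vals[1::2])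
  (pairs.map Prod.fst, pairs.map (fun p => [p.1, p.2]))

-- ===== PRECONDITION & SPEC =====
-- Pre_ excludes association lists with duplicate keys: a Python dict cannot hold them
-- (duplicates collapse on construction), so A's behaviour there is not represented by the list.
def Pre_reformatCart (data : List (String × Int)) : Prop := (data.map Prod.fst).Nodup
instance (data : List (String × Int)) : Decidable (Pre_reformatCart data) := by unfold Pre_reformatCart; infer_instance
def pvWitness_reformatCart : (List (String × Int)) := [("a", 1), ("b", 2), ("c", 3)]

def Spec_reformatCart (data : List (String × Int)) (out : List Int × List (List Int)) : Prop := out = reformatCart_alt data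
instance (data : List (String × Int)) (out : List Int × List (List Int)) : Decidable (Spec_reformatCart data out) := by unfold Spec_reformatCart; infer_instance

-- ===== CLAIM (what is proved, stated in full; the proofs are below) =====
def Claim_equal_reformatCart : Prop := ∀ (data : List (String × Int)), Dom_reformatCart data → Pre_reformatCart data → Spec_reformatCart data (reformatCart data)

-- ===== LEMMAS AND PROOFS =====

-- A's loop body once the dict lookup has been resolved to the pair's own value
def stepB (s : List Int × List (List Int) × List Int) (v : Int) : List Int × List (List Int) × List Int :=
  let arr := s.2.2 ++ [v]
  if arr.length = 2 then
    (s.1 ++ [(PySem.List.pyGet? arr 0).getD 0], s.2.1 ++ [arr], ([] : List Int))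
  else (s.1, s.2.1, arr)

-- leftover buffer after the loop
def tail2 : List Int → List Int
  | [] => []
  | [x] => [x]
  | _ :: _ :: rest => tail2 rest

lemma stride2_cons (y : Int) (rest : List Int) : stride2 (y :: rest) = y :: stride2 rest.tail := by
  cases rest <;> rfl

lemma loopB : ∀ (vals : List Int) (ids : List Int) (arrays : List (List Int)),
    vals.foldl stepB (ids, arrays, ([] : List Int)) =
      (ids ++ ((stride2 vals).zip (stride2 vals.tail)).map Prod.fst,
       arrays ++ ((stride2 vals).zip (stride2 vals.tail)).map (fun p => [p.1, p.2]),
       tail2 vals) := by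
  intro vals
  induction vals using stride2.induct with
  | case1 => intro ids arrays; simp [stride2, tail2]
  | case2 x => intro ids arrays; simp [stride2, tail2, stepB]
  | case3 x y rest ih =>
      intro ids arrays
      have h2 : (x :: y :: rest).foldl stepB (ids, arrays, ([] : List Int)) =
          rest.foldl stepB (ids ++ [x], arrays ++ [[x, y]], ([] : List Int)) := by
        simp [stepB, PySem.List.pyGet?, PySem.List.pyIdx?]
      rw [h2, ih]
      simp only [stride2, List.tail_cons, stride2_cons y rest, List.zip_cons_cons,
        List.map_cons, tail2]
      simp

lemma foldA_eq_foldB (data : List (String × Int)) (h : (data.map Prod.fst).Nodup) :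
    data.foldl
      (fun (s : List Int × List (List Int) × List Int) item =>
        let arr := s.2.2 ++ [((PySem.Dict.mk data).get? item.1).getD 0]
        if arr.length = 2 then
          (s.1 ++ [(PySem.List.pyGet? arr 0).getD 0], s.2.1 ++ [arr], ([] : List Int))
        else (s.1, s.2.1, arr))
      ([], [], []) =
    (data.map Prod.snd).foldl stepB ([], [], []) := by
  rw [List.foldl_map]
  apply PySem.List.foldl_congr_mem
  intro acc item hmem
  have hget : (PySem.Dict.mk data).get? item.1 = some item.2 := by
    apply PySem.Dict.get?_of_mem_items
    · simpa [PySem.Dict.items] using hmem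
    · simpa [PySem.Dict.keys, PySem.Dict.items] using h
  simp [stepB, hget]

theorem reformatCart_spec : Claim_equal_reformatCart := by
  intro data _ hpre
  unfold Spec_reformatCart reformatCart reformatCart_alt
  rw [foldA_eq_foldB data hpre, loopB]
  simp
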